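-- pv_equiv track=rewrite | github.com/dplocki/advent-of-code | 2015/2015_05.py | same_letter_with_one_between
-- ===== SOURCE A (Python) =====
-- import itertools
--
-- def same_letter_with_one_between(line: str) -> bool:
--     f, s = itertools.tee(line)
--     next(s)
--     next(s)
--
--     for a, b in zip(f, s):
--         if a == b:
--             return True
--
--     return False
-- ===== SOURCE B (Python) =====
-- import re
--
-- def same_letter_with_one_between(line: str) -> bool:
--     # regex backreference: some char, any char, the same char again
--     return bool(re.search(r'(.).\1', line, re.DOTALL))
-- ===== Notes on version B (the rewrite author's own statement) =====
-- stated objective: idiomatic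
-- what changed: Replaced the itertools.tee/zip explicit scan loop with a single regex backreference search r'(.).\1' (with DOTALL), letting the regex engine do the traversal.
import Mathlib
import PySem

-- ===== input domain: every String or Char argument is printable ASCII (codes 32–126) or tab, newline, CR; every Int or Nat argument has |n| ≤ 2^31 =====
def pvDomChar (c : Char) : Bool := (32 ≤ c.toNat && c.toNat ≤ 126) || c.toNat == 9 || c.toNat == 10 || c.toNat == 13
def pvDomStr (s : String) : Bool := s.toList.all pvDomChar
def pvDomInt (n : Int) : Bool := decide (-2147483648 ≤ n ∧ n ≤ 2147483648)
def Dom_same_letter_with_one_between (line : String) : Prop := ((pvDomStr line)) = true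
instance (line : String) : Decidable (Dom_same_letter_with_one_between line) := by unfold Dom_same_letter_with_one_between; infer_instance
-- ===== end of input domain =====

-- B replaces A's itertools.tee/zip scan loop with a regex backreference search r'(.).\1'
-- (DOTALL); equivalence of return values is proved on strings of length ≥ 2 (A raises below).

-- ===== PORT A =====
-- A: f, s = tee(line); next(s); next(s); then loop over zip(f, s), return True on first a == b.
def pvLoopA : List (Char × Char) → Bool
  | [] => false
  | (a, b) :: rest => if a == b then true else pvLoopA rest

def same_letter_with_one_between (line : String) : Bool :=
  -- zip(f, s) pairs line[i] with line[i+2]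
  pvLoopA (line.toList.zip (line.toList.drop 2))

-- ===== PORT B =====
-- B: re.search(r'(.).\1', line, re.DOTALL) — at each position try to match
-- "capture a char, any char, the same char"; advance one on failure.
def pvRegexSearch : List Char → Bool
  | a :: b :: c :: rest => if a == c then true else pvRegexSearch (b :: c :: rest)
  | _ => false

def same_letter_with_one_between_alt (line : String) : Bool :=
  pvRegexSearch line.toList

-- ===== PRECONDITION & SPEC =====
-- A raises StopIteration (next on the exhausted tee copy) when the string has fewer than 2 chars.
def Pre_same_letter_with_one_between (line : String) : Prop := 2 ≤ line.toList.length
instance (line : String) : Decidable (Pre_same_letter_with_one_between line) := by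
  unfold Pre_same_letter_with_one_between; infer_instance

def pvWitness_same_letter_with_one_between : String := "aba"

def Spec_same_letter_with_one_between (line : String) (out : Bool) : Prop :=
  out = same_letter_with_one_between_alt line
instance (line : String) (out : Bool) : Decidable (Spec_same_letter_with_one_between line out) := by
  unfold Spec_same_letter_with_one_between; infer_instance

-- ===== CLAIM (what is proved, stated in full; the proofs are below) =====
def Claim_equal_same_letter_with_one_between : Prop :=
  ∀ (line : String), Dom_same_letter_with_one_between line →
    Pre_same_letter_with_one_between line →
    Spec_same_letter_with_one_between line (same_letter_with_one_between line)

-- ===== LEMMAS AND PROOFS =====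

-- Both scans decide the same thing: some char equals the char two positions later.
theorem pvLoop_eq_search : ∀ (l : List Char), pvLoopA (l.zip (l.drop 2)) = pvRegexSearch l
  | [] => rfl
  | [_] => rfl
  | [_, _] => rfl
  | a :: b :: c :: rest => by
      simp only [List.drop, List.zip_cons_cons, pvLoopA, pvRegexSearch]
      split
      · rfl
      · exact pvLoop_eq_search (b :: c :: rest)

-- ===== VERDICT (by name: the statement is the Claim_ definition above) =====
theorem same_letter_with_one_between_spec : Claim_equal_same_letter_with_one_between := by
  intro line _ _
  unfold Spec_same_letter_with_one_between same_letter_with_one_between same_letter_with_one_between_alt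
  exact pvLoop_eq_search line.toList
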